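-- pv_equiv track=rewrite | github.com/tobiaspasinato/utn | stark/functions_stark.py | contador_de_pelo
-- ===== SOURCE A (Python) =====
-- def contador_de_pelo(lista : list):
--     yellow_cont = 0
--     brown_cont = 0
--     black_cont = 0
--     auburn_cont = 0
--     red_orange = 0
--     white_cont = 0
--     no_Hair_cont = 0
--     blond_cont = 0
--     green_cont = 0
--
--     for personaje in lista:
--         if personaje["color_pelo"].upper() == "YELLOW":
--             yellow_cont += 1
--         if personaje["color_pelo"].upper() == "BROWN" or personaje["color_pelo"] == "BROWN / WHITE":
--             brown_cont += 1
--         if personaje["color_pelo"].upper() == "BLACK":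
--             black_cont += 1
--         if personaje["color_pelo"].upper() == "AUBURN":
--             auburn_cont += 1
--         if personaje["color_pelo"].upper() == "WHITE":
--             white_cont += 1
--         if personaje["color_pelo"].upper() == "NO HAIR" or personaje["color_pelo"].upper() == "":
--             no_Hair_cont += 1
--         if personaje["color_pelo"].upper() == "BLOND":
--             blond_cont += 1
--         if personaje["color_pelo"].upper() == "GREEN":
--             green_cont += 1
--         if personaje["color_pelo"].upper() == "RED / ORANGE":
--             red_orange += 1
--     mensaje = f"""Color de Pelo:
--     Yelow: {yellow_cont}
--     Brown: {brown_cont}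
--     Black: {black_cont}
--     Auburn: {auburn_cont}
--     White: {white_cont}
--     No Hair: {no_Hair_cont}
--     Blond: {blond_cont}
--     Green: {green_cont}
--     Red / Orange: {red_orange}
--     """
--     return mensaje
-- ===== SOURCE B (Python) =====
-- def contador_de_pelo(lista : list):
--     colors = [p["color_pelo"] for p in lista]
--     freq = {}
--     for c in colors:
--         u = c.upper()
--         freq[u] = freq.get(u, 0) + 1
--
--     def g(k):
--         return freq.get(k, 0)
--
--     return (f"Color de Pelo:\n"
--             f"    Yelow: {g('YELLOW')}\n"
--             f"    Brown: {g('BROWN') + colors.count('BROWN / WHITE')}\n"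
--             f"    Black: {g('BLACK')}\n"
--             f"    Auburn: {g('AUBURN')}\n"
--             f"    White: {g('WHITE')}\n"
--             f"    No Hair: {g('NO HAIR') + g('')}\n"
--             f"    Blond: {g('BLOND')}\n"
--             f"    Green: {g('GREEN')}\n"
--             f"    Red / Orange: {g('RED / ORANGE')}\n"
--             f"    ")
-- ===== Notes on version B (the rewrite author's own statement) =====
-- stated objective: idiomatic
-- what changed: Replaces A's nine per-element equality tests accumulated in nine counters by one pass building a frequency dict of upper-cased colors (plus a list.count for the raw 'BROWN / WHITE' arm), then reads the nine report values off the dict.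
import Mathlib
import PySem

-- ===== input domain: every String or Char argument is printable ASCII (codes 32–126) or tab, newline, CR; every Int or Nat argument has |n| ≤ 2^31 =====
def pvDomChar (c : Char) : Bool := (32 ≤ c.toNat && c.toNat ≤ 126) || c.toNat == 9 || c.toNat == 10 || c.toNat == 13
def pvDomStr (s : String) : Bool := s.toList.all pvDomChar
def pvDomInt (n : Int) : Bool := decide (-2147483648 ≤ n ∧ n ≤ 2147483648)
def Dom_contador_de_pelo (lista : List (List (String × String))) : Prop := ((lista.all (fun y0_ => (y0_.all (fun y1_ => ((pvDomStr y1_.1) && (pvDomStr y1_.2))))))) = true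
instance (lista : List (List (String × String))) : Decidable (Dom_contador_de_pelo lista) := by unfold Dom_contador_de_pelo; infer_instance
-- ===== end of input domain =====

-- B replaces A's nine per-element boolean tests by one frequency dict of upper-cased colors
-- built in a single pass, reading the nine counters off the dict (objective: idiomatic).

-- shared accessor: personaje["color_pelo"] (first match; total stand-in, KeyError excluded by Pre_)
def pvColor (p : List (String × String)) : String :=
  (PySem.Dict.mk p).getD "color_pelo" ""

-- ===== PORT A =====
def contador_de_pelo (lista : List (List (String × String))) : String :=
  let r := lista.foldl (fun st personaje =>
    match st with
    | (y, b, bl, au, ro, w, nh, bo, gr) =>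
      let c := pvColor personaje
      let y := if PySem.Str.upper c == "YELLOW" then y + 1 else y
      let b := if PySem.Str.upper c == "BROWN" || c == "BROWN / WHITE" then b + 1 else b
      let bl := if PySem.Str.upper c == "BLACK" then bl + 1 else bl
      let au := if PySem.Str.upper c == "AUBURN" then au + 1 else au
      let w := if PySem.Str.upper c == "WHITE" then w + 1 else w
      let nh := if PySem.Str.upper c == "NO HAIR" || PySem.Str.upper c == "" then nh + 1 else nh
      let bo := if PySem.Str.upper c == "BLOND" then bo + 1 else bo
      let gr := if PySem.Str.upper c == "GREEN" then gr + 1 else gr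
      let ro := if PySem.Str.upper c == "RED / ORANGE" then ro + 1 else ro
      (y, b, bl, au, ro, w, nh, bo, gr))
    (((0:Int), (0:Int), (0:Int), (0:Int), (0:Int), (0:Int), (0:Int), (0:Int), (0:Int)))
  match r with
  | (y, b, bl, au, ro, w, nh, bo, gr) =>
    "Color de Pelo:\n    Yelow: " ++ PySem.Int.toStr y ++
    "\n    Brown: " ++ PySem.Int.toStr b ++
    "\n    Black: " ++ PySem.Int.toStr bl ++
    "\n    Auburn: " ++ PySem.Int.toStr au ++
    "\n    White: " ++ PySem.Int.toStr w ++
    "\n    No Hair: " ++ PySem.Int.toStr nh ++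
    "\n    Blond: " ++ PySem.Int.toStr bo ++
    "\n    Green: " ++ PySem.Int.toStr gr ++
    "\n    Red / Orange: " ++ PySem.Int.toStr ro ++
    "\n    "

-- ===== PORT B =====
def contador_de_pelo_alt (lista : List (List (String × String))) : String :=
  let colors := lista.map (fun p => pvColor p)
  let freq := colors.foldl (fun d c =>
    let u := PySem.Str.upper c
    d.insert u (d.getD u 0 + 1)) PySem.Dict.empty
  let g := fun (k : String) => freq.getD k (0:Int)
  "Color de Pelo:\n    Yelow: " ++ PySem.Int.toStr (g "YELLOW") ++
  "\n    Brown: " ++ PySem.Int.toStr (g "BROWN" + (colors.count "BROWN / WHITE" : Int)) ++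
  "\n    Black: " ++ PySem.Int.toStr (g "BLACK") ++
  "\n    Auburn: " ++ PySem.Int.toStr (g "AUBURN") ++
  "\n    White: " ++ PySem.Int.toStr (g "WHITE") ++
  "\n    No Hair: " ++ PySem.Int.toStr (g "NO HAIR" + g "") ++
  "\n    Blond: " ++ PySem.Int.toStr (g "BLOND") ++
  "\n    Green: " ++ PySem.Int.toStr (g "GREEN") ++
  "\n    Red / Orange: " ++ PySem.Int.toStr (g "RED / ORANGE") ++
  "\n    "

-- ===== PRECONDITION & SPEC =====
-- Pre_ excludes exactly the inputs where personaje["color_pelo"] raises KeyError (a dict without that key).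
def Pre_contador_de_pelo (lista : List (List (String × String))) : Prop :=
  (lista.all (fun p => p.any (fun kv => kv.1 == "color_pelo"))) = true
instance (lista : List (List (String × String))) : Decidable (Pre_contador_de_pelo lista) := by unfold Pre_contador_de_pelo; infer_instance
def pvWitness_contador_de_pelo : (List (List (String × String))) := [[("color_pelo", "Blond")]]

def Spec_contador_de_pelo (lista : List (List (String × String))) (out : String) : Prop := out = contador_de_pelo_alt lista
instance (lista : List (List (String × String))) (out : String) : Decidable (Spec_contador_de_pelo lista out) := by unfold Spec_contador_de_pelo; infer_instance

-- ===== CLAIM (what is proved, stated in full; the proofs are below) =====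
def Claim_equal_contador_de_pelo : Prop := ∀ (lista : List (List (String × String))), Dom_contador_de_pelo lista → Pre_contador_de_pelo lista → Spec_contador_de_pelo lista (contador_de_pelo lista)

-- ===== LEMMAS AND PROOFS =====

-- countP of a disjunction of disjoint Boolean predicates splits into a sum
theorem pv_countP_or_disj {α : Type} (p q : α → Bool) (l : List α)
    (h : ∀ a, ¬(p a = true ∧ q a = true)) :
    l.countP (fun a => p a || q a) = l.countP p + l.countP q := by
  induction l with
  | nil => simp
  | cons x t ih =>
    simp only [List.countP_cons, ih]
    by_cases hp : p x = true <;> by_cases hq : q x = true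
    · exact absurd ⟨hp, hq⟩ (h x)
    all_goals simp [hp, hq] <;> omega

-- A's fold computes the nine countP's
theorem pv_foldA (l : List (List (String × String))) (y b bl au ro w nh bo gr : Int) :
    l.foldl (fun st personaje =>
      match st with
      | (y, b, bl, au, ro, w, nh, bo, gr) =>
        let c := pvColor personaje
        let y := if PySem.Str.upper c == "YELLOW" then y + 1 else y
        let b := if PySem.Str.upper c == "BROWN" || c == "BROWN / WHITE" then b + 1 else b
        let bl := if PySem.Str.upper c == "BLACK" then bl + 1 else bl
        let au := if PySem.Str.upper c == "AUBURN" then au + 1 else au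
        let w := if PySem.Str.upper c == "WHITE" then w + 1 else w
        let nh := if PySem.Str.upper c == "NO HAIR" || PySem.Str.upper c == "" then nh + 1 else nh
        let bo := if PySem.Str.upper c == "BLOND" then bo + 1 else bo
        let gr := if PySem.Str.upper c == "GREEN" then gr + 1 else gr
        let ro := if PySem.Str.upper c == "RED / ORANGE" then ro + 1 else ro
        (y, b, bl, au, ro, w, nh, bo, gr)) (y, b, bl, au, ro, w, nh, bo, gr)
    = (y + (l.countP (fun p => PySem.Str.upper (pvColor p) == "YELLOW") : Int),
       b + (l.countP (fun p => PySem.Str.upper (pvColor p) == "BROWN" || pvColor p == "BROWN / WHITE") : Int),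
       bl + (l.countP (fun p => PySem.Str.upper (pvColor p) == "BLACK") : Int),
       au + (l.countP (fun p => PySem.Str.upper (pvColor p) == "AUBURN") : Int),
       ro + (l.countP (fun p => PySem.Str.upper (pvColor p) == "RED / ORANGE") : Int),
       w + (l.countP (fun p => PySem.Str.upper (pvColor p) == "WHITE") : Int),
       nh + (l.countP (fun p => PySem.Str.upper (pvColor p) == "NO HAIR" || PySem.Str.upper (pvColor p) == "") : Int),
       bo + (l.countP (fun p => PySem.Str.upper (pvColor p) == "BLOND") : Int),
       gr + (l.countP (fun p => PySem.Str.upper (pvColor p) == "GREEN") : Int)) := by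
  induction l generalizing y b bl au ro w nh bo gr with
  | nil => simp
  | cons x t ih =>
    rw [List.foldl_cons]
    simp only [ih, List.countP_cons, Prod.mk.injEq]
    refine ⟨?_, ?_, ?_, ?_, ?_, ?_, ?_, ?_, ?_⟩ <;> (split_ifs <;> push_cast <;> omega)

-- B's dict lookup is a count of upper-cased colors
theorem pv_freq_getD (colors : List String) (v : String) :
    (colors.foldl (fun d c =>
      let u := PySem.Str.upper c
      d.insert u (d.getD u 0 + 1)) PySem.Dict.empty).getD v (0:Int)
    = (colors.countP (fun c => PySem.Str.upper c == v) : Int) := by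
  have h : (fun (d : PySem.Dict String Int) (c : String) =>
      let u := PySem.Str.upper c
      d.insert u (d.getD u 0 + 1))
      = (fun d c => (fun (d : PySem.Dict String Int) u => d.insert u (d.getD u 0 + 1)) d (PySem.Str.upper c)) := rfl
  rw [h, ← List.foldl_map (f := PySem.Str.upper)
        (g := fun (d : PySem.Dict String Int) u => d.insert u (d.getD u 0 + 1))
        (l := colors) (init := PySem.Dict.empty),
      PySem.Dict.getD_foldl_insert_add_one]
  rw [List.count_eq_countP, List.countP_map]
  simp [PySem.Dict.getD_empty, Function.comp_def]

theorem pv_upper_bw : PySem.Str.upper "BROWN / WHITE" = "BROWN / WHITE" := by decide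

-- ===== VERDICT (by name: the statement is the Claim_ definition above) =====
theorem contador_de_pelo_spec : Claim_equal_contador_de_pelo := by
  intro lista _ _
  unfold Spec_contador_de_pelo contador_de_pelo contador_de_pelo_alt
  simp only [pv_foldA, pv_freq_getD, List.countP_map, List.count_eq_countP, Function.comp_def]
  have hbw : lista.countP
      (fun p => PySem.Str.upper (pvColor p) == "BROWN" || pvColor p == "BROWN / WHITE")
      = lista.countP (fun p => PySem.Str.upper (pvColor p) == "BROWN")
        + lista.countP (fun p => pvColor p == "BROWN / WHITE") := by
    apply pv_countP_or_disj
    intro a ⟨h1, h2⟩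
    have : pvColor a = "BROWN / WHITE" := by simpa using h2
    rw [this, pv_upper_bw] at h1
    simp at h1
  have hnh : lista.countP
      (fun p => PySem.Str.upper (pvColor p) == "NO HAIR" || PySem.Str.upper (pvColor p) == "")
      = lista.countP (fun p => PySem.Str.upper (pvColor p) == "NO HAIR")
        + lista.countP (fun p => PySem.Str.upper (pvColor p) == "") := by
    apply pv_countP_or_disj
    intro a ⟨h1, h2⟩
    have e1 : PySem.Str.upper (pvColor a) = "NO HAIR" := by simpa using h1
    have e2 : PySem.Str.upper (pvColor a) = "" := by simpa using h2
    rw [e1] at e2; exact absurd e2 (by decide)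
  rw [hbw, hnh]
  push_cast
  ring_nf
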